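-- pv_equiv track=rewrite | github.com/JMLizano/aoc-2023 | day3/part2.py | get_possible_gears
-- ===== SOURCE A (Python) =====
-- from collections import defaultdict
-- from typing import Dict, List, Set, Tuple
--
-- def gears_in_neighboorhood(row: int, col: int, engine_map: List[List[str]]) -> Set[Tuple[int, int]]:
--     possible_gears = set()
--     for row_modifier in [-1, 0, 1]:
--         for col_modifier in [-1, 0, 1]:
--             neighbor_row = min(max(row + row_modifier, 0), len(engine_map) -1)
--             neighbor_col = min(max(col + col_modifier, 0), len(engine_map[0]) -1)
--             neighbor = engine_map[neighbor_row][neighbor_col]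
--             if neighbor == "*":
--                 possible_gears.add((neighbor_row, neighbor_col))
--     return possible_gears
--
-- def get_possible_gears(engine_map: List[List[str]]) -> Dict[Tuple[int, int], List[int]]:
--     possible_gears_location = defaultdict(list)
--     for row, character_line in enumerate(engine_map):
--         current_number = ""
--         current_gears_in_neighborhood = set()
--         for col, character in enumerate(character_line):
--             if character.isnumeric():
--                 current_number += character
--                 possible_gears_in_neighboorhood = gears_in_neighboorhood(row, col, engine_map)
--                 current_gears_in_neighborhood = current_gears_in_neighborhood.union(possible_gears_in_neighboorhood)
--             if not character.isnumeric() or col == len(character_line) -1: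
--                 if current_gears_in_neighborhood:
--                     for gear_position in current_gears_in_neighborhood:
--                         possible_gears_location[gear_position].append(int(current_number))
--                 current_number = ""
--                 current_gears_in_neighborhood = set()
--     return possible_gears_location
-- ===== SOURCE B (Python) =====
-- from collections import defaultdict
-- from typing import Dict, List, Tuple
--
--
-- def get_possible_gears(engine_map: List[List[str]]) -> Dict[Tuple[int, int], List[int]]:
--     # Two-phase: collect maximal numeric runs (spans) first, then scan each
--     # span's neighborhood with plain bounds checks for '*' cells.
--     possible_gears_location = defaultdict(list)
--     spans = []
--     for row, line in enumerate(engine_map):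
--         col = 0
--         while col < len(line):
--             if line[col].isnumeric():
--                 start = col
--                 while col < len(line) and line[col].isnumeric():
--                     col += 1
--                 spans.append((row, start, col - 1, int("".join(line[start:col]))))
--             else:
--                 col += 1
--     n_rows = len(engine_map)
--     for row, start, end, value in spans:
--         gears = []
--         for col in range(start, end + 1):
--             for row_mod in (-1, 0, 1):
--                 for col_mod in (-1, 0, 1):
--                     r, c = row + row_mod, col + col_mod
--                     if (0 <= r < n_rows and 0 <= c < len(engine_map[r])
--                             and engine_map[r][c] == "*" and (r, c) not in gears):
--                         gears.append((r, c))
--         for gear in gears: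
--             possible_gears_location[gear].append(value)
--     return possible_gears_location
-- ===== Notes on version B (the rewrite author's own statement) =====
-- stated objective: alternative
-- what changed: A is a one-pass state machine that grows a digit string and a gear set per cell with min/max-clamped 3x3 indexing; B first extracts each row's maximal numeric runs as (row,start,end,value) spans and then scans each span's neighborhood with plain bounds checks, so the flush/accumulator logic and the edge clamping disappear.
-- outside the precondition, e.g. on get_possible_gears([['1', '2', '3'], ['*']]): A raises IndexError, B returns {(1, 0): [123]}; on get_possible_gears([['.'], ['1', '*']]): A returns {}, B returns {(1, 1): [1]}
import Mathlib
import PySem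

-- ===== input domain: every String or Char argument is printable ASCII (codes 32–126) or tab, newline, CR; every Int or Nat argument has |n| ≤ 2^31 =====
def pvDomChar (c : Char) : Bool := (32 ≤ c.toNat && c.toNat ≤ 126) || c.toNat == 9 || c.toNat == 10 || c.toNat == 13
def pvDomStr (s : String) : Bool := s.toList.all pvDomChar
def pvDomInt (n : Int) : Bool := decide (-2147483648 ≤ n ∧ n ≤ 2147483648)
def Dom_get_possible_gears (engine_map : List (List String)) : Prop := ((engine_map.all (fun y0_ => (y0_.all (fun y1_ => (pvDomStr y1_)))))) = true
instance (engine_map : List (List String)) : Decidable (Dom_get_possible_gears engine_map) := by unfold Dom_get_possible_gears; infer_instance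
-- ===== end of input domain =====

-- B replaces A's one-pass digit-string/gear-set state machine (with min/max-clamped
-- 3x3 indexing) by a two-phase algorithm: extract each row's maximal numeric runs as
-- spans, then scan each span's neighborhood with plain bounds checks (objective: alternative).

-- ===== PORT A =====
def gears_in_neighboorhood (row : Int) (col : Int) (engine_map : List (List String)) : PySem.Set (Int × Int) :=
  [(-1 : Int), 0, 1].foldl (fun pg rm =>
    [(-1 : Int), 0, 1].foldl (fun pg cm =>
      let nr := min (max (row + rm) 0) (PySem.List.len engine_map - 1)
      -- engine_map[0]: every caller has just seen a numeric cell, so engine_map ≠ []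
      let nc := min (max (col + cm) 0) (PySem.List.len ((PySem.List.pyGet? engine_map 0).getD []) - 1)
      -- engine_map[nr][nc]: pyGet? is Python indexing; the default "" is only reached
      -- where Python raises IndexError, which Pre_ excludes
      let neighbor := (PySem.List.pyGet? ((PySem.List.pyGet? engine_map nr).getD []) nc).getD ""
      if neighbor == "*" then PySem.Set.add pg (nr, nc) else pg) pg)
    PySem.Set.empty

-- one step of A's inner loop; state = (dict, current_number as chars, gear set)
def pgStep (engine_map : List (List String)) (row lineLen : Int)
    (st : PySem.Dict (Int × Int) (List Int) × List Char × PySem.Set (Int × Int))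
    (p : Int × String) : PySem.Dict (Int × Int) (List Int) × List Char × PySem.Set (Int × Int) :=
  -- character.isnumeric(): on the printable-ASCII domain it agrees with str.isdigit
  let cur := if PySem.Str.strIsdigit p.2 then st.2.1 ++ p.2.toList else st.2.1
  let gears := if PySem.Str.strIsdigit p.2 then
      PySem.Set.union st.2.2 (gears_in_neighboorhood row p.1 engine_map) else st.2.2
  if !PySem.Str.strIsdigit p.2 || p.1 == lineLen - 1 then
    -- int(current_number): cur is nonempty all-digits whenever gears ≠ ∅, so getD 0 is never used
    let d := if gears.isEmpty then st.1
      else gears.foldl (fun d g =>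
        PySem.Dict.modify d g [] (fun l => l ++ [(PySem.Int.ofChars? cur).getD 0])) st.1
    (d, [], PySem.Set.empty)
  else
    (st.1, cur, gears)

def get_possible_gears (engine_map : List (List String)) : List (Int × Int × List Int) :=
  ((PySem.List.enumerate engine_map).foldl (fun d rp =>
      ((PySem.List.enumerate rp.2).foldl
        (pgStep engine_map rp.1 (PySem.List.len rp.2)) (d, [], PySem.Set.empty)).1)
    PySem.Dict.empty).items.map (fun p => (p.1.1, p.1.2, p.2))

-- ===== PORT B =====
-- the inner "while col < len(line) and line[col].isnumeric(): col += 1" of Source B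
def altTakeRun : List String → List String
  | [] => []
  | x :: xs => if PySem.Str.strIsdigit x then x :: altTakeRun xs else []

def altDropRun : List String → List String
  | [] => []
  | x :: xs => if PySem.Str.strIsdigit x then altDropRun xs else x :: xs

lemma altDropRun_length_le (xs : List String) : (altDropRun xs).length ≤ xs.length := by
  induction xs with
  | nil => simp [altDropRun]
  | cons x xs ih =>
    simp only [altDropRun]
    split
    · exact le_trans ih (Nat.le_succ _)
    · simp

-- Source B's outer while over one line: maximal numeric runs as (start, end, int(join(run)))
def altSpans : List String → Int → List (Int × Int × Int)
  | [], _ => []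
  | x :: xs, col =>
    if PySem.Str.strIsdigit x then
      let run := x :: altTakeRun xs
      (col, col + (run.length : Int) - 1,
        (PySem.Int.ofChars? (PySem.Chars.join [] (run.map String.toList))).getD 0)
        :: altSpans (altDropRun xs) (col + (run.length : Int))
    else
      altSpans xs (col + 1)
termination_by xs => xs.length
decreasing_by
  · exact Nat.lt_succ_of_le (altDropRun_length_le xs)
  · simp

def altGears (engine_map : List (List String)) (row start fin : Int) : List (Int × Int) :=
  (PySem.List.pyRange start (fin + 1) 1).foldl (fun gears col =>
    [(-1 : Int), 0, 1].foldl (fun gears rowMod =>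
      [(-1 : Int), 0, 1].foldl (fun gears colMod =>
        let r := row + rowMod
        let c := col + colMod
        let line := (PySem.List.pyGet? engine_map r).getD []
        if 0 ≤ r && r < PySem.List.len engine_map && 0 ≤ c && c < PySem.List.len line
            && ((PySem.List.pyGet? line c).getD "" == "*") then
          PySem.Set.add gears (r, c)
        else gears) gears) gears) PySem.Set.empty

def get_possible_gears_alt (engine_map : List (List String)) : List (Int × Int × List Int) :=
  let spans := (PySem.List.enumerate engine_map).foldl
      (fun acc rp => acc ++ (altSpans rp.2 0).map (fun sp => (rp.1, sp))) []
  (spans.foldl (fun d sp =>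
      (altGears engine_map sp.1 sp.2.1 sp.2.2.1).foldl
        (fun d g => PySem.Dict.modify d g [] (fun l => l ++ [sp.2.2.2])) d)
    PySem.Dict.empty).items.map (fun p => (p.1.1, p.1.2, p.2))

-- ===== PRECONDITION & SPEC =====
-- Pre_ restricts to the task's natural domain: rectangular grids (or grids with no numeric
-- cell, where A touches no neighbor); on other ragged grids A clamps every column index with
-- the FIRST row's width, raising IndexError or silently missing '*' cells beyond that width.
def Pre_get_possible_gears (engine_map : List (List String)) : Prop :=
  (∀ line ∈ engine_map, line.length = (engine_map.headD []).length) ∨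
  (∀ line ∈ engine_map, ∀ c ∈ line, PySem.Str.strIsdigit c = false)
instance (engine_map : List (List String)) : Decidable (Pre_get_possible_gears engine_map) := by
  unfold Pre_get_possible_gears; infer_instance

def pvWitness_get_possible_gears : List (List String) :=
  [["4", "6", "."], [".", ".", "*"], ["3", "5", "."]]

def Spec_get_possible_gears (engine_map : List (List String)) (out : List (Int × Int × List Int)) : Prop := out = get_possible_gears_alt engine_map
instance (engine_map : List (List String)) (out : List (Int × Int × List Int)) : Decidable (Spec_get_possible_gears engine_map out) := by unfold Spec_get_possible_gears; infer_instance

-- ===== CLAIM (what is proved, stated in full; the proofs are below) =====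
def Claim_equal_get_possible_gears : Prop := ∀ (engine_map : List (List String)), Dom_get_possible_gears engine_map → Pre_get_possible_gears engine_map → Spec_get_possible_gears engine_map (get_possible_gears engine_map)

-- ===== LEMMAS AND PROOFS =====

-- proof-side abbreviations --------------------------------------------------
def pvStar (em : List (List String)) (p : Int × Int) : Bool :=
  ((PySem.List.pyGet? ((PySem.List.pyGet? em p.1).getD []) p.2).getD "" == "*")

def pvClamp (x n : Int) : Int := min (max x 0) (n - 1)

def pvCandsA (row col R W : Int) : List (Int × Int) :=
  [(-1 : Int), 0, 1].flatMap (fun rm => [(-1 : Int), 0, 1].map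
    (fun cm => (pvClamp (row + rm) R, pvClamp (col + cm) W)))

def pvCandsB (row col : Int) : List (Int × Int) :=
  [(-1 : Int), 0, 1].flatMap (fun rm => [(-1 : Int), 0, 1].map
    (fun cm => (row + rm, col + cm)))

def pvInb (R W : Int) (p : Int × Int) : Bool :=
  decide (0 ≤ p.1) && decide (p.1 < R) && decide (0 ≤ p.2) && decide (p.2 < W)

def pvGaAcc (em : List (List String)) (row a b : Int) : PySem.Set (Int × Int) :=
  (PySem.List.pyRange a b 1).foldl
    (fun s c => PySem.Set.union s (gears_in_neighboorhood row c em)) PySem.Set.empty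

def pvFlat (P : List String) : List Char := (P.map String.toList).flatten

def pvIntOf (cs : List Char) : Int := (PySem.Int.ofChars? cs).getD 0

def pvFlush (em : List (List String)) (row : Int)
    (d : PySem.Dict (Int × Int) (List Int)) (sp : Int × Int × Int) :
    PySem.Dict (Int × Int) (List Int) :=
  (pvGaAcc em row sp.1 (sp.2.1 + 1)).foldl
    (fun d g => PySem.Dict.modify d g [] (fun l => l ++ [sp.2.2])) d

-- A's state after processing part of a run, described span-wise
def pvMerge (P : List String) (ys : List String) (c : Int) : List (Int × Int × Int) :=
  match ys with
  | [] => []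
  | y :: t =>
    if PySem.Str.strIsdigit y then
      (c - (P.length : Int), c + ((y :: altTakeRun t).length : Int) - 1,
        pvIntOf (pvFlat (P ++ (y :: altTakeRun t))))
        :: altSpans (altDropRun t) (c + ((y :: altTakeRun t).length : Int))
    else
      (if P.isEmpty then [] else [(c - (P.length : Int), c - 1, pvIntOf (pvFlat P))])
        ++ altSpans t (c + 1)

-- generic small facts --------------------------------------------------------
lemma pvFoldGuard {α β : Type} (s : List α) (f : β → α → β) (d : β) :
    (if s.isEmpty then d else s.foldl f d) = s.foldl f d := by
  cases s <;> simp

lemma pvJoinNil (l : List (List Char)) : PySem.Chars.join [] l = l.flatten := by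
  induction l with
  | nil => simp [PySem.Chars.join_nil]
  | cons a t ih =>
    cases t with
    | nil => simp [PySem.Chars.join_singleton]
    | cons b t2 => rw [PySem.Chars.join_cons_cons, ih]; simp

lemma pvDiscard_eq_filter {α : Type} [BEq α] [LawfulBEq α] (s : List α) (x : α) :
    PySem.Set.discard s x = s.filter (fun y => !(y == x)) := by
  induction s with
  | nil => rfl
  | cons a t ih => simp [PySem.Set.discard, List.filter]

lemma pvOfList_map_inj {α β : Type} [BEq α] [LawfulBEq α] [BEq β] [LawfulBEq β] (f : α → β)
    (hf : Function.Injective f) (xs : List α) :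
    PySem.Set.ofList (xs.map f) = (PySem.Set.ofList xs).map f := by
  induction xs with
  | nil => rfl
  | cons x t ih =>
    rw [List.map_cons, PySem.Set.ofList_cons, PySem.Set.ofList_cons, ih,
        pvDiscard_eq_filter, pvDiscard_eq_filter, List.filter_map, List.map_cons]
    congr 1
    congr 1
    apply List.filter_congr
    intro y _
    simp [hf.eq_iff]

lemma pvOfList_filter {α : Type} [BEq α] [LawfulBEq α] (p : α → Bool) (xs : List α) :
    PySem.Set.ofList (xs.filter p) = (PySem.Set.ofList xs).filter p := by
  induction xs with
  | nil => rfl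
  | cons x t ih =>
    by_cases h : p x = true
    · rw [List.filter_cons_of_pos h, PySem.Set.ofList_cons, PySem.Set.ofList_cons,
          List.filter_cons_of_pos h, ih, pvDiscard_eq_filter, pvDiscard_eq_filter,
          List.filter_filter, List.filter_filter]
      congr 1
      apply List.filter_congr
      intro y _
      by_cases hy : y = x <;> simp [hy, h, Bool.and_comm]
    · rw [List.filter_cons_of_neg h, PySem.Set.ofList_cons, List.filter_cons_of_neg h, ih,
          pvDiscard_eq_filter, List.filter_filter]
      apply List.filter_congr
      intro y _
      by_cases hy : y = x <;> simp [hy, h, Bool.and_comm]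

lemma pvFilter_product (as bs : List Int) (q1 q2 : Int → Bool) :
    (as.flatMap (fun a => bs.map (fun b => (a, b)))).filter (fun p => q1 p.1 && q2 p.2) =
      (as.filter q1).flatMap (fun a => (bs.filter q2).map (fun b => (a, b))) := by
  induction as with
  | nil => rfl
  | cons a t ih =>
    rw [List.flatMap_cons, List.filter_append, ih, List.filter_map]
    by_cases ha : q1 a = true
    · rw [List.filter_cons_of_pos ha, List.flatMap_cons]
      congr 2
      apply List.filter_congr
      intro b _
      simp [ha]
    · rw [List.filter_cons_of_neg ha]
      have : List.filter ((fun p => q1 p.1 && q2 p.2) ∘ fun b => (a, b)) bs = [] := by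
        apply List.filter_eq_nil_iff.mpr
        intro b _
        simp [ha]
      rw [this, List.map_nil, List.nil_append]

lemma pvDedup_product (as bs : List Int) :
    PySem.List.dedup (as.flatMap (fun a => bs.map (fun b => (a, b)))) =
      (PySem.List.dedup as).flatMap (fun a => (PySem.List.dedup bs).map (fun b => (a, b))) := by
  simp only [PySem.List.dedup_eq_ofList]
  induction as with
  | nil => rfl
  | cons a t ih =>
    rw [List.flatMap_cons, PySem.Set.ofList_append, PySem.Set.update_eq_append_filter, ih,
        pvOfList_map_inj (fun b => ((a : Int), b)) (fun x y hxy => by simpa using congrArg Prod.snd hxy),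
        PySem.Set.ofList_cons, pvDiscard_eq_filter, List.flatMap_cons]
    congr 1
    have hcg : List.filter (fun y => !PySem.Set.contains (List.map (fun b => ((a : Int), b)) (PySem.Set.ofList bs)) y)
          ((PySem.Set.ofList t).flatMap (fun a => (PySem.Set.ofList bs).map (fun b => (a, b)))) =
        List.filter (fun p => !(p.1 == a) && true)
          ((PySem.Set.ofList t).flatMap (fun a => (PySem.Set.ofList bs).map (fun b => (a, b)))) := by
      apply List.filter_congr
      intro p hp
      rcases List.mem_flatMap.mp hp with ⟨a', _, hp'⟩
      rcases List.mem_map.mp hp' with ⟨b', hb', rfl⟩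
      have hb2 : b' ∈ PySem.Set.ofList bs := hb'
      simp only [PySem.Set.contains_eq_listContains, List.contains_eq_any_beq, List.any_map,
        Bool.and_true, Bool.not_inj_iff]
      cases haa : (a' == a) with
      | false =>
        refine List.any_eq_false.mpr ?_
        intro b _
        have hne : a' ≠ a := ne_of_beq_false haa
        simp [Function.comp, Prod.ext_iff, hne]
      | true =>
        have : a' = a := eq_of_beq haa
        subst this
        exact List.any_eq_true.mpr ⟨b', hb2, by simp [Function.comp]⟩
    rw [hcg, pvFilter_product (PySem.Set.ofList t) (PySem.Set.ofList bs)
      (fun y => !(y == a)) (fun _ => true), List.filter_true]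

lemma pvDedup_aaa (a : Int) : PySem.List.dedup [a, a, a] = [a] := by
  simp [PySem.List.dedup_eq_ofList, PySem.Set.ofList_eq_foldl, List.foldl]

lemma pvDedup_aab (a b : Int) (h : a ≠ b) : PySem.List.dedup [a, a, b] = [a, b] := by
  simp [PySem.List.dedup_eq_ofList, PySem.Set.ofList_eq_foldl, List.foldl,
    Ne.symm h]

lemma pvDedup_abb (a b : Int) (h : a ≠ b) : PySem.List.dedup [a, b, b] = [a, b] := by
  simp [PySem.List.dedup_eq_ofList, PySem.Set.ofList_eq_foldl, List.foldl,
    Ne.symm h]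

lemma pvDedup_abc (a b c : Int) (hab : a ≠ b) (hac : a ≠ c) (hbc : b ≠ c) :
    PySem.List.dedup [a, b, c] = [a, b, c] := by
  simp [PySem.List.dedup_eq_ofList, PySem.Set.ofList_eq_foldl, List.foldl,
    Ne.symm hab, Ne.symm hac, Ne.symm hbc]

lemma pvFilterWindow (x n : Int) :
    [x + -1, x + 0, x + 1].filter (fun y => decide (0 ≤ y) && decide (y < n)) =
      (if (decide (0 ≤ x + -1) && decide (x + -1 < n)) = true then [x + -1] else []) ++
      (if (decide (0 ≤ x + 0) && decide (x + 0 < n)) = true then [x + 0] else []) ++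
      (if (decide (0 ≤ x + 1) && decide (x + 1 < n)) = true then [x + 1] else []) := by
  cases hd1 : (decide (0 ≤ x + -1) && decide (x + -1 < n)) <;>
  cases hd2 : (decide (0 ≤ x + 0) && decide (x + 0 < n)) <;>
  cases hd3 : (decide (0 ≤ x + 1) && decide (x + 1 < n)) <;>
  simp only [List.filter_cons, List.filter_nil, hd1, hd2, hd3] <;> simp

lemma pvFilterWindow1 (x n : Int) (h1 : ¬ (0 ≤ x + -1 ∧ x + -1 < n))
    (h2 : 0 ≤ x + 0 ∧ x + 0 < n) (h3 : ¬ (0 ≤ x + 1 ∧ x + 1 < n)) :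
    [x + -1, x + 0, x + 1].filter (fun y => decide (0 ≤ y) && decide (y < n)) = [x] := by
  have d1 : (decide (0 ≤ x + -1) && decide (x + -1 < n)) = false := by simp; omega
  have d2 : (decide (0 ≤ x + 0) && decide (x + 0 < n)) = true := by simp; omega
  have d3 : (decide (0 ≤ x + 1) && decide (x + 1 < n)) = false := by simp; omega
  rw [pvFilterWindow, d1, d2, d3]
  norm_num

lemma pvFilterWindow2r (x n : Int) (h1 : ¬ (0 ≤ x + -1 ∧ x + -1 < n))
    (_h2 : 0 ≤ x + 0 ∧ x + 0 < n) (h3 : 0 ≤ x + 1 ∧ x + 1 < n) :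
    [x + -1, x + 0, x + 1].filter (fun y => decide (0 ≤ y) && decide (y < n)) = [x, x + 1] := by
  have d1 : (decide (0 ≤ x + -1) && decide (x + -1 < n)) = false := by simp; omega
  have d2 : (decide (0 ≤ x + 0) && decide (x + 0 < n)) = true := by simp; omega
  have d3 : (decide (0 ≤ x + 1) && decide (x + 1 < n)) = true := by simp; omega
  rw [pvFilterWindow, d1, d2, d3]
  norm_num

lemma pvFilterWindow2l (x n : Int) (h1 : 0 ≤ x + -1 ∧ x + -1 < n)
    (h2 : 0 ≤ x + 0 ∧ x + 0 < n) (h3 : ¬ (0 ≤ x + 1 ∧ x + 1 < n)) :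
    [x + -1, x + 0, x + 1].filter (fun y => decide (0 ≤ y) && decide (y < n)) = [x + -1, x] := by
  have d1 : (decide (0 ≤ x + -1) && decide (x + -1 < n)) = true := by simp; omega
  have d2 : (decide (0 ≤ x + 0) && decide (x + 0 < n)) = true := by simp; omega
  have d3 : (decide (0 ≤ x + 1) && decide (x + 1 < n)) = false := by simp; omega
  rw [pvFilterWindow, d1, d2, d3]
  norm_num

lemma pvFilterWindow3 (x n : Int) (h1 : 0 ≤ x + -1 ∧ x + -1 < n)
    (h2 : 0 ≤ x + 0 ∧ x + 0 < n) (h3 : 0 ≤ x + 1 ∧ x + 1 < n) :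
    [x + -1, x + 0, x + 1].filter (fun y => decide (0 ≤ y) && decide (y < n)) =
      [x + -1, x, x + 1] := by
  have d1 : (decide (0 ≤ x + -1) && decide (x + -1 < n)) = true := by simp; omega
  have d2 : (decide (0 ≤ x + 0) && decide (x + 0 < n)) = true := by simp; omega
  have d3 : (decide (0 ≤ x + 1) && decide (x + 1 < n)) = true := by simp; omega
  rw [pvFilterWindow, d1, d2, d3]
  norm_num

-- the clamped 3-window dedups to the bounds-checked window
lemma pvDedup3 (x n : Int) (h0 : 0 ≤ x) (h1 : x < n) :
    PySem.List.dedup [pvClamp (x + -1) n, pvClamp (x + 0) n, pvClamp (x + 1) n] =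
      [x + -1, x + 0, x + 1].filter (fun y => decide (0 ≤ y) && decide (y < n)) := by
  have e2 : pvClamp (x + 0) n = x := by simp [pvClamp]; omega
  by_cases hx0 : x = 0 <;> by_cases hxn : x = n - 1
  · -- n = 1 : window is [x, x, x], only x survives the bounds check
    have e1 : pvClamp (x + -1) n = x := by simp [pvClamp]; omega
    have e3 : pvClamp (x + 1) n = x := by simp [pvClamp]; omega
    rw [e1, e2, e3, pvDedup_aaa, pvFilterWindow1 x n (by omega) (by omega) (by omega)]
  · -- x = 0 < n - 1 : [x, x, x+1]
    have e1 : pvClamp (x + -1) n = x := by simp [pvClamp]; omega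
    have e3 : pvClamp (x + 1) n = x + 1 := by simp [pvClamp]; omega
    rw [e1, e2, e3, pvDedup_aab x (x + 1) (by omega),
        pvFilterWindow2r x n (by omega) (by omega) (by omega)]
  · -- 0 < x = n - 1 : [x-1, x, x]
    have e1 : pvClamp (x + -1) n = x + -1 := by simp [pvClamp]; omega
    have e3 : pvClamp (x + 1) n = x := by simp [pvClamp]; omega
    rw [e1, e2, e3, pvDedup_abb (x + -1) x (by omega),
        pvFilterWindow2l x n (by omega) (by omega) (by omega)]
  · -- interior : all three distinct and in bounds
    have e1 : pvClamp (x + -1) n = x + -1 := by simp [pvClamp]; omega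
    have e3 : pvClamp (x + 1) n = x + 1 := by simp [pvClamp]; omega
    rw [e1, e2, e3, pvDedup_abc (x + -1) x (x + 1) (by omega) (by omega) (by omega),
        pvFilterWindow3 x n (by omega) (by omega) (by omega)]

-- fold of nine conditional adds = Set.update with the filtered candidate list
lemma pvCondFold9 (f : Int → Int → Int × Int) (g : Int × Int → Bool)
    (s : PySem.Set (Int × Int)) :
    [(-1 : Int), 0, 1].foldl (fun s rm =>
      [(-1 : Int), 0, 1].foldl (fun s cm =>
        if g (f rm cm) then PySem.Set.add s (f rm cm) else s) s) s =
    PySem.Set.update s (([(-1 : Int), 0, 1].flatMap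
      (fun rm => [(-1 : Int), 0, 1].map (fun cm => f rm cm))).filter g) := by
  show _ = (((([(-1 : Int), 0, 1].flatMap
      (fun rm => [(-1 : Int), 0, 1].map (fun cm => f rm cm))).filter g)).foldl PySem.Set.add s)
  rw [← PySem.List.foldl_if_eq_foldl_filter g PySem.Set.add]
  rfl

-- A's neighborhood scan as an explicit candidate list
lemma pvGin_eq (em : List (List String)) (row col : Int) :
    gears_in_neighboorhood row col em =
      PySem.Set.ofList ((pvCandsA row col (PySem.List.len em)
        (PySem.List.len ((PySem.List.pyGet? em 0).getD []))).filter (pvStar em)) := by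
  unfold gears_in_neighboorhood pvCandsA pvClamp pvStar
  exact pvCondFold9
    (fun rm cm => (min (max (row + rm) 0) (PySem.List.len em - 1),
      min (max (col + cm) 0) (PySem.List.len ((PySem.List.pyGet? em 0).getD []) - 1)))
    (fun p => ((PySem.List.pyGet? ((PySem.List.pyGet? em p.1).getD []) p.2).getD "" == "*"))
    PySem.Set.empty

-- core: clamped candidates dedup to the bounds-checked candidates
lemma pvCands_core (row col R W : Int) (hr0 : 0 ≤ row) (hr1 : row < R)
    (hc0 : 0 ≤ col) (hc1 : col < W) :
    PySem.Set.ofList (pvCandsA row col R W) = (pvCandsB row col).filter (pvInb R W) := by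
  have hrows : pvCandsA row col R W =
      [pvClamp (row + -1) R, pvClamp (row + 0) R, pvClamp (row + 1) R].flatMap
        (fun a => [pvClamp (col + -1) W, pvClamp (col + 0) W, pvClamp (col + 1) W].map
          (fun b => (a, b))) := rfl
  have hrB : pvCandsB row col =
      [row + -1, row + 0, row + 1].flatMap
        (fun a => [col + -1, col + 0, col + 1].map (fun b => (a, b))) := rfl
  rw [hrows, hrB, ← PySem.List.dedup_eq_ofList, pvDedup_product,
      pvDedup3 row R hr0 hr1, pvDedup3 col W hc0 hc1, ← pvFilter_product]
  apply List.filter_congr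
  intro p _
  simp [pvInb, Bool.and_assoc]

-- ragged-proof bounds test of B equals the rectangular one
lemma pvInbB_eq (em : List (List String)) (W : Int)
    (hrect : ∀ line ∈ em, (line.length : Int) = W) (p : Int × Int) :
    (decide (0 ≤ p.1) && decide (p.1 < PySem.List.len em) && decide (0 ≤ p.2) &&
      decide (p.2 < PySem.List.len ((PySem.List.pyGet? em p.1).getD []))) =
      pvInb (PySem.List.len em) W p := by
  unfold pvInb
  by_cases h1 : (0:Int) ≤ p.1
  · by_cases h2 : p.1 < PySem.List.len em
    · have hlt : p.1.toNat < em.length := by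
        rw [PySem.List.len_eq] at h2; omega
      have hg : PySem.List.pyGet? em p.1 = some (em[p.1.toNat]) := by
        rw [PySem.List.pyGet?_of_nonneg (xs := em) h1, List.getElem?_eq_getElem hlt]
      have hlen : PySem.List.len ((PySem.List.pyGet? em p.1).getD []) = W := by
        rw [hg, Option.getD_some, PySem.List.len_eq]
        exact hrect _ (List.getElem_mem hlt)
      rw [hlen]
    · have d2 : decide (p.1 < PySem.List.len em) = false := decide_eq_false h2
      rw [d2]
      simp
  · have d1 : decide ((0:Int) ≤ p.1) = false := decide_eq_false h1
    rw [d1]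
    simp

lemma pvUpdate_ofList {α : Type} [BEq α] [LawfulBEq α] (s : PySem.Set α) (l : List α) :
    PySem.Set.update s (PySem.Set.ofList l) = PySem.Set.update s l := by
  rw [PySem.Set.update_eq_append_filter, PySem.Set.update_eq_append_filter,
      PySem.Set.ofList_ofList]

-- one column step: A's union-with-clamped-neighborhood = B's nine bounds-checked adds
lemma pvColStep (em : List (List String)) (W : Int)
    (hrect : ∀ line ∈ em, (line.length : Int) = W)
    (hW0 : (((em.headD []).length : Int)) = W)
    (row col : Int) (hr0 : 0 ≤ row) (hr1 : row < PySem.List.len em)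
    (hc0 : 0 ≤ col) (hc1 : col < W) (s : PySem.Set (Int × Int)) :
    PySem.Set.union s (gears_in_neighboorhood row col em) =
      [(-1 : Int), 0, 1].foldl (fun gears rowMod =>
        [(-1 : Int), 0, 1].foldl (fun gears colMod =>
          let r := row + rowMod
          let c := col + colMod
          let line := (PySem.List.pyGet? em r).getD []
          if 0 ≤ r && r < PySem.List.len em && 0 ≤ c && c < PySem.List.len line
              && ((PySem.List.pyGet? line c).getD "" == "*") then
            PySem.Set.add gears (r, c)
          else gears) gears) s := by
  have hW0' : PySem.List.len ((PySem.List.pyGet? em 0).getD []) = W := by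
    cases em with
    | nil => simp [PySem.List.len_eq] at hr1; omega
    | cons l0 rest =>
      rw [PySem.List.pyGet?_zero_cons, Option.getD_some]
      simpa using hW0
  have hB := pvCondFold9 (fun rm cm => (row + rm, col + cm))
      (fun p => (decide (0 ≤ p.1) && decide (p.1 < PySem.List.len em) && decide (0 ≤ p.2)
        && decide (p.2 < PySem.List.len ((PySem.List.pyGet? em p.1).getD []))) && pvStar em p) s
  rw [show ([(-1 : Int), 0, 1].foldl (fun gears rowMod =>
      [(-1 : Int), 0, 1].foldl (fun gears colMod =>
        let r := row + rowMod
        let c := col + colMod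
        let line := (PySem.List.pyGet? em r).getD []
        if 0 ≤ r && r < PySem.List.len em && 0 ≤ c && c < PySem.List.len line
            && ((PySem.List.pyGet? line c).getD "" == "*") then
          PySem.Set.add gears (r, c)
        else gears) gears) s) =
      PySem.Set.update s ((pvCandsB row col).filter
        (fun p => (decide (0 ≤ p.1) && decide (p.1 < PySem.List.len em) && decide (0 ≤ p.2)
          && decide (p.2 < PySem.List.len ((PySem.List.pyGet? em p.1).getD []))) && pvStar em p))
      from hB]
  rw [show PySem.Set.union s (gears_in_neighboorhood row col em) =
      PySem.Set.update s (gears_in_neighboorhood row col em) from rfl]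
  rw [pvGin_eq, hW0', pvUpdate_ofList]
  have hfc : (pvCandsB row col).filter
      (fun p => (decide (0 ≤ p.1) && decide (p.1 < PySem.List.len em) && decide (0 ≤ p.2)
        && decide (p.2 < PySem.List.len ((PySem.List.pyGet? em p.1).getD []))) && pvStar em p) =
      ((pvCandsB row col).filter (pvInb (PySem.List.len em) W)).filter (pvStar em) := by
    rw [List.filter_filter]
    apply List.filter_congr
    intro p _
    rw [pvInbB_eq em W hrect p]
    exact Bool.and_comm _ _
  have hOf : PySem.Set.ofList ((pvCandsA row col (PySem.List.len em) W).filter (pvStar em)) =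
      PySem.Set.ofList ((pvCandsB row col).filter
        (fun p => (decide (0 ≤ p.1) && decide (p.1 < PySem.List.len em) && decide (0 ≤ p.2)
          && decide (p.2 < PySem.List.len ((PySem.List.pyGet? em p.1).getD []))) && pvStar em p)) := by
    rw [hfc, pvOfList_filter, pvOfList_filter,
        ← pvCands_core row col (PySem.List.len em) W hr0 hr1 hc0 hc1, PySem.Set.ofList_ofList]
  rw [PySem.Set.update_eq_append_filter, PySem.Set.update_eq_append_filter, hOf]

lemma pvGaAcc_empty (em : List (List String)) (row a : Int) : pvGaAcc em row a a = [] := by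
  simp [pvGaAcc, PySem.List.pyRange_one_eq_nil le_rfl]

lemma pvGaAcc_extend (em : List (List String)) (row a b : Int) (h : a ≤ b) :
    pvGaAcc em row a (b + 1) =
      PySem.Set.union (pvGaAcc em row a b) (gears_in_neighboorhood row b em) := by
  unfold pvGaAcc
  rw [PySem.List.pyRange_one_succ_right h, List.foldl_append]
  simp [List.foldl]

lemma pvGaAcc_eq_altGears (em : List (List String)) (W : Int)
    (hrect : ∀ line ∈ em, (line.length : Int) = W)
    (hW0 : (((em.headD []).length : Int)) = W)
    (row s e : Int) (hr0 : 0 ≤ row) (hr1 : row < PySem.List.len em)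
    (hs : 0 ≤ s) (hse : s ≤ e) (he : e < W) :
    pvGaAcc em row s (e + 1) = altGears em row s e := by
  unfold pvGaAcc altGears
  apply PySem.List.foldl_congr_mem
  intro acc c hc
  have hcb := PySem.List.mem_pyRange_one.mp hc
  exact pvColStep em W hrect hW0 row c hr0 hr1 (le_trans hs hcb.1) (by omega) acc

-- span structure -------------------------------------------------------------
lemma pvTakeDrop_length (xs : List String) :
    (altTakeRun xs).length + (altDropRun xs).length = xs.length := by
  induction xs with
  | nil => rfl
  | cons x t ih =>
    by_cases h : PySem.Str.strIsdigit x = true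
    · simp only [altTakeRun, altDropRun, if_pos h, List.length_cons]; omega
    · simp only [altTakeRun, altDropRun, if_neg h, List.length_cons, List.length_nil]; omega

lemma pvSpans_bounds (L : List String) (c : Int) :
    ∀ sp ∈ altSpans L c, c ≤ sp.1 ∧ sp.1 ≤ sp.2.1 ∧ sp.2.1 < c + (L.length : Int) := by
  induction L, c using altSpans.induct with
  | case1 c => simp [altSpans]
  | case2 x xs col hdig run ih =>
    have hrun : run = x :: altTakeRun xs := rfl
    rw [altSpans, if_pos hdig]
    intro sp hsp
    have hlen := pvTakeDrop_length xs
    rcases List.mem_cons.mp hsp with rfl | hsp'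
    · simp only [List.length_cons]
      push_cast
      refine ⟨le_refl _, by omega, by omega⟩
    · have h3 := ih sp (by rw [hrun]; exact hsp')
      rw [hrun] at h3
      simp only [List.length_cons] at h3 ⊢
      push_cast at h3 ⊢
      omega
  | case3 x xs col hdig ih =>
    rw [altSpans, if_neg hdig]
    intro sp hsp
    have h3 := ih sp hsp
    simp only [List.length_cons]
    push_cast at h3 ⊢
    omega

lemma pvMerge_nil (ys : List String) (c : Int) : pvMerge [] ys c = altSpans ys c := by
  cases ys with
  | nil => simp [pvMerge, altSpans]
  | cons y t =>
    by_cases h : PySem.Str.strIsdigit y = true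
      <;> rw [PySem.Str.strIsdigit_eq] at h
    · simp [pvMerge, altSpans, h, pvIntOf, pvFlat, pvJoinNil]
    · simp [pvMerge, altSpans, h]

lemma pvMerge_push (P : List String) (y : String) (t : List String) (c : Int)
    (hy : PySem.Str.strIsdigit y = true) (ht : t ≠ []) :
    pvMerge P (y :: t) c = pvMerge (P ++ [y]) t (c + 1) := by
  cases t with
  | nil => exact absurd rfl ht
  | cons b t2 =>
    by_cases hb : PySem.Str.strIsdigit b = true
    · have hTake : altTakeRun (b :: t2) = b :: altTakeRun t2 := by rw [altTakeRun, if_pos hb]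
      have hDrop : altDropRun (b :: t2) = altDropRun t2 := by rw [altDropRun, if_pos hb]
      have hl : P ++ y :: b :: altTakeRun t2 = (P ++ [y]) ++ b :: altTakeRun t2 := by simp
      simp only [pvMerge, hy, hb, if_true, hTake, hDrop, hl]
      push_cast [List.length_append, List.length_cons, List.length_nil]
      have e1 : c - (P.length : Int) = c + 1 - ((P.length : Int) + 1) := by omega
      have e2 : c + (((altTakeRun t2).length : Int) + 1 + 1)
          = c + 1 + (((altTakeRun t2).length : Int) + 1) := by omega
      rw [e1, e2]
    · have hTake : altTakeRun (b :: t2) = [] := by rw [altTakeRun, if_neg hb]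
      have hDrop : altDropRun (b :: t2) = b :: t2 := by rw [altDropRun, if_neg hb]
      have hSp : altSpans (b :: t2) (c + 1) = altSpans t2 (c + 1 + 1) := by
        rw [altSpans, if_neg hb]
      have hEmp : (P ++ [y]).isEmpty = false := by simp
      simp only [pvMerge, hy, hb, if_true, hTake, hDrop, hEmp, Bool.false_eq_true, if_false,
        List.length_cons, List.length_nil, List.length_append]
      push_cast
      rw [List.singleton_append]
      have e1 : c - (P.length : Int) = c + 1 - ((P.length : Int) + 1) := by omega
      rw [e1, hSp]

-- the big induction: A's inner state machine = span-wise flushing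
lemma pvInner (em : List (List String)) (row n : Int) :
    ∀ (ys : List String) (c : Int) (P : List String)
      (d : PySem.Dict (Int × Int) (List Int)),
      c + (ys.length : Int) = n → (ys = [] → P = []) →
      ((PySem.List.enumerate ys c).foldl (pgStep em row n)
        (d, pvFlat P, pvGaAcc em row (c - (P.length : Int)) c)).1 =
      (pvMerge P ys c).foldl (pvFlush em row) d := by
  intro ys
  induction ys with
  | nil =>
    intro c P d h1 h2
    simp [pvMerge]
  | cons y t ih =>
    intro c P d h1 h2
    rw [PySem.List.enumerate_cons, List.foldl_cons]
    by_cases hy : PySem.Str.strIsdigit y = true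
    · have hgext : PySem.Set.union (pvGaAcc em row (c - (P.length : Int)) c)
          (gears_in_neighboorhood row c em) = pvGaAcc em row (c - (P.length : Int)) (c + 1) :=
        (pvGaAcc_extend em row _ c (by omega)).symm
      have hflat : pvFlat P ++ y.toList = pvFlat (P ++ [y]) := by simp [pvFlat]
      by_cases hlast : t = []
      · subst hlast
        have hceq : c = n - 1 := by
          simp only [List.length_cons, List.length_nil] at h1
          push_cast at h1
          omega
        have hc : (c == n - 1) = true := by simp [hceq]
        have hstep : pgStep em row n (d, pvFlat P, pvGaAcc em row (c - (P.length : Int)) c) (c, y)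
            = ((pvGaAcc em row (c - (P.length : Int)) (c + 1)).foldl
                (fun d g => PySem.Dict.modify d g []
                  (fun l => l ++ [pvIntOf (pvFlat (P ++ [y]))])) d,
               [], PySem.Set.empty) := by
          simp only [pgStep, hy, hc, Bool.not_true, Bool.false_or, if_true, hflat, hgext, pvIntOf]
          rw [pvFoldGuard]
        rw [hstep]
        simp only [PySem.List.enumerate_nil, List.foldl_nil]
        have hyC : PySem.Chars.strIsdigit y.toList = true := by
          rwa [PySem.Str.strIsdigit_eq] at hy
        have hm : pvMerge P [y] c
            = [(c - (P.length : Int), c + 1 - 1, pvIntOf (pvFlat (P ++ [y])))] := by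
          simp [pvMerge, hyC, altTakeRun, altSpans, altDropRun]
        rw [hm]
        simp only [List.foldl_cons, List.foldl_nil, pvFlush]
        rw [show c + 1 - 1 + 1 = c + 1 from by omega]
      · have hc : (c == n - 1) = false := by
          have hpos : 0 < t.length := List.length_pos_iff.mpr hlast
          simp only [List.length_cons] at h1
          push_cast at h1
          simp only [beq_eq_false_iff_ne, ne_eq]
          omega
        have hstep : pgStep em row n (d, pvFlat P, pvGaAcc em row (c - (P.length : Int)) c) (c, y)
            = (d, pvFlat (P ++ [y]), pvGaAcc em row (c - (P.length : Int)) (c + 1)) := by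
          simp only [pgStep, hy, hc, Bool.not_true, Bool.false_or, Bool.false_eq_true, if_false,
            hflat, hgext, eq_self_iff_true, if_true]
        rw [hstep]
        rw [show c - (P.length : Int) = (c + 1) - (((P ++ [y]).length : Int)) from by
          simp only [List.length_append, List.length_cons, List.length_nil]; push_cast; omega]
        rw [ih (c + 1) (P ++ [y]) d (by
              simp only [List.length_cons] at h1
              push_cast at h1 ⊢
              omega)
            (fun h => absurd h hlast)]
        rw [pvMerge_push P y t c hy hlast]
    · have hyf : PySem.Str.strIsdigit y = false := eq_false_of_ne_true hy
      have hstep : pgStep em row n (d, pvFlat P, pvGaAcc em row (c - (P.length : Int)) c) (c, y)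
          = ((pvGaAcc em row (c - (P.length : Int)) c).foldl
              (fun d g => PySem.Dict.modify d g [] (fun l => l ++ [pvIntOf (pvFlat P)])) d,
             [], PySem.Set.empty) := by
        simp only [pgStep, hyf, Bool.not_false, Bool.true_or, if_true, pvIntOf,
          Bool.false_eq_true, if_false]
        rw [pvFoldGuard]
      rw [hstep]
      rw [show ((pvGaAcc em row (c - (P.length : Int)) c).foldl
            (fun d g => PySem.Dict.modify d g [] (fun l => l ++ [pvIntOf (pvFlat P)])) d,
            ([] : List Char), (PySem.Set.empty : PySem.Set (Int × Int)))
          = ((pvGaAcc em row (c - (P.length : Int)) c).foldl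
            (fun d g => PySem.Dict.modify d g [] (fun l => l ++ [pvIntOf (pvFlat P)])) d,
            pvFlat ([] : List String),
            pvGaAcc em row ((c + 1) - ((([] : List String).length : Int))) (c + 1)) from by
          rw [show pvGaAcc em row ((c + 1) - ((([] : List String).length : Int))) (c + 1) = [] from by
            rw [show ((c:Int) + 1) - ((([] : List String).length : Int)) = c + 1 from by simp]
            exact pvGaAcc_empty em row (c + 1)]
          rfl]
      rw [ih (c + 1) [] _ (by
            simp only [List.length_cons] at h1
            push_cast at h1 ⊢
            omega) (fun _ => rfl),
          pvMerge_nil]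
      by_cases hP : P = []
      · subst hP
        have hm : pvMerge ([] : List String) (y :: t) c = altSpans t (c + 1) := by
          have hyfC : PySem.Chars.strIsdigit y.toList = false := by
            rwa [PySem.Str.strIsdigit_eq] at hyf
          simp [pvMerge, hyfC]
        rw [hm]
        congr 1
        rw [show (c:Int) - ((([] : List String).length : Int)) = c from by simp,
            pvGaAcc_empty em row c]
        rfl
      · have hm : pvMerge P (y :: t) c
            = (c - (P.length : Int), c - 1, pvIntOf (pvFlat P)) :: altSpans t (c + 1) := by
          have hPe : P.isEmpty = false := by simpa using hP
          have hyfC : PySem.Chars.strIsdigit y.toList = false := by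
            rwa [PySem.Str.strIsdigit_eq] at hyf
          simp [pvMerge, hyfC, hPe]
        rw [hm, List.foldl_cons]
        congr 1
        simp only [pvFlush]
        rw [show c - 1 + 1 = c from by omega]

-- digit-free grids -----------------------------------------------------------
lemma pvNoDigit_inner (em : List (List String)) (row n : Int) (ys : List String)
    (h : ∀ x ∈ ys, PySem.Str.strIsdigit x = false) :
    ∀ (c : Int) (d : PySem.Dict (Int × Int) (List Int)),
      (PySem.List.enumerate ys c).foldl (pgStep em row n) (d, [], PySem.Set.empty) =
        (d, [], PySem.Set.empty) := by
  induction ys with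
  | nil => intro c d; simp [PySem.List.enumerate]
  | cons y t ih =>
    intro c d
    have hy : PySem.Str.strIsdigit y = false := h y (List.mem_cons_self)
    rw [PySem.Str.strIsdigit_eq] at hy
    rw [PySem.List.enumerate_cons, List.foldl_cons]
    have hst : pgStep em row n (d, [], PySem.Set.empty) (c, y) = (d, [], PySem.Set.empty) := by
      simp [pgStep, hy, PySem.Set.empty]
    rw [hst]
    exact ih (fun x hx => h x (List.mem_cons_of_mem _ hx)) (c + 1) d

lemma pvNoDigit_spans (ys : List String) (h : ∀ x ∈ ys, PySem.Str.strIsdigit x = false) :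
    ∀ c, altSpans ys c = [] := by
  induction ys with
  | nil => intro c; simp [altSpans]
  | cons y t ih =>
    intro c
    have hy : PySem.Str.strIsdigit y = false := h y (List.mem_cons_self)
    rw [altSpans]
    simp only [hy, Bool.false_eq_true, if_false]
    exact ih (fun x hx => h x (List.mem_cons_of_mem _ hx)) (c + 1)

-- ===== VERDICT (by name: the statement is the Claim_ definition above) =====
theorem get_possible_gears_spec : Claim_equal_get_possible_gears := by
  intro em _ hpre
  unfold Spec_get_possible_gears get_possible_gears get_possible_gears_alt
  have hspans : ((PySem.List.enumerate em).foldl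
      (fun acc rp => acc ++ (altSpans rp.2 0).map (fun sp => (rp.1, sp)))
      ([] : List (Int × Int × Int × Int)))
      = (PySem.List.enumerate em).flatMap
          (fun rp => (altSpans rp.2 0).map (fun sp => (rp.1, sp))) := by
    rw [PySem.List.foldl_append_eq_flatMap]
    rfl
  rcases hpre with hrect | hnod
  · have hrect' : ∀ line ∈ em, (line.length : Int) = (((em.headD []).length : Nat) : Int) :=
      fun l hl => by exact_mod_cast congrArg (Nat.cast : Nat → Int) (hrect l hl)
    refine congrArg
      (fun (d : PySem.Dict (Int × Int) (List Int)) => d.items.map (fun p => (p.1.1, p.1.2, p.2))) ?_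
    simp only [hspans, List.foldl_flatMap, List.foldl_map]
    apply PySem.List.foldl_congr_mem
    intro d rp hrp
    rcases (PySem.List.mem_enumerate_iff em 0 rp).mp hrp with ⟨k, hk, rfl⟩
    have hr0 : (0:Int) ≤ 0 + (k : Int) := by omega
    have hr1 : 0 + (k : Int) < PySem.List.len em := by
      rw [PySem.List.len_eq]; push_cast; omega
    have hmem : em[k] ∈ em := List.getElem_mem hk
    have hin : ((PySem.List.enumerate em[k] 0).foldl
        (pgStep em (0 + (k:Int)) (PySem.List.len em[k]))
        (d, ([] : List Char), (PySem.Set.empty : PySem.Set (Int × Int)))).1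
        = (pvMerge [] em[k] 0).foldl (pvFlush em (0 + (k:Int))) d :=
      pvInner em (0 + (k:Int)) (PySem.List.len em[k]) em[k] 0 [] d
        (by simp [PySem.List.len_eq]) (fun _ => rfl)
    rw [pvMerge_nil] at hin
    rw [hin]
    apply PySem.List.foldl_congr_mem
    intro d2 sp hsp
    have hb := pvSpans_bounds em[k] 0 sp hsp
    have hw : (em[k].length : Int) = (((em.headD []).length : Nat) : Int) := hrect' _ hmem
    simp only [pvFlush]
    rw [pvGaAcc_eq_altGears em (((em.headD []).length : Nat) : Int) hrect' rfl
        (0 + (k:Int)) sp.1 sp.2.1 hr0 hr1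
        (by have := hb.1; omega) hb.2.1
        (by have h1 := hb.2.2; omega)]
  · refine congrArg
      (fun (d : PySem.Dict (Int × Int) (List Int)) => d.items.map (fun p => (p.1.1, p.1.2, p.2))) ?_
    simp only [hspans]
    have hflat : (PySem.List.enumerate em).flatMap
        (fun rp => (altSpans rp.2 0).map (fun sp => (rp.1, sp))) = [] := by
      rw [List.flatMap_eq_nil_iff]
      intro rp hrp
      rcases (PySem.List.mem_enumerate_iff em 0 rp).mp hrp with ⟨k, hk, rfl⟩
      rw [pvNoDigit_spans em[k] (fun x hx => hnod _ (List.getElem_mem hk) x hx) 0]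
      rfl
    rw [hflat]
    rw [PySem.List.foldl_congr_mem _ _ (fun d _ => d) _ ?_]
    · rw [PySem.List.foldl_ignore]
      rfl
    · intro d rp hrp
      rcases (PySem.List.mem_enumerate_iff em 0 rp).mp hrp with ⟨k, hk, rfl⟩
      rw [pvNoDigit_inner em (0 + (k:Int)) (PySem.List.len em[k]) em[k]
        (fun x hx => hnod _ (List.getElem_mem hk) x hx) 0 d]
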